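-- pv_equiv track=rewrite | github.com/MarkinHaus/ToolBoxV2 | toolboxv2/tests/test_mods/test_isaa/test_unified_context_manager.py | _extract_relevant_facts
-- ===== SOURCE A (Python) =====
-- def _extract_relevant_facts(world_model: dict, query: str) -> list:
--     """Extrahiere relevante Facts basierend auf Query"""
--     try:
--         query_words = set(query.lower().split())
--         relevant_facts = []
--
--         for key, value in world_model.items():
--             key_words = set(key.lower().split())
--             value_words = set(str(value).lower().split())
--
--             key_overlap = len(query_words.intersection(key_words))
--             value_overlap = len(query_words.intersection(value_words))
--
--             if key_overlap > 0 or value_overlap > 0: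
--                 relevance_score = key_overlap * 2 + value_overlap
--                 relevant_facts.append((relevance_score, key, value))
--
--         relevant_facts.sort(key=lambda x: x[0], reverse=True)
--         return [(key, value) for _, key, value in relevant_facts[:5]]
--     except:
--         return list(world_model.items())[:5]
-- ===== SOURCE B (Python) =====
-- def _extract_relevant_facts(world_model: dict, query: str) -> list:
--     """Relevante Facts: Ein-Pass-Auswahl der Top-5 statt Gesamtsortierung."""
--     query_words = list(dict.fromkeys(query.lower().split()))
--     top = []  # at most 5 (score, key, value) triples, score-descending, arrival-stable
--     for key, value in world_model.items():
--         key_words = key.lower().split()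
--         value_words = str(value).lower().split()
--         score = sum((2 if w in key_words else 0) + (1 if w in value_words else 0)
--                     for w in query_words)
--         if score > 0:
--             i = 0
--             while i < len(top) and top[i][0] >= score:
--                 i += 1
--             top.insert(i, (score, key, value))
--             del top[5:]
--     return [(key, value) for _, key, value in top]
-- ===== Notes on version B (the rewrite author's own statement) =====
-- stated objective: alternative
-- what changed: B replaces A's build-all-then-stable-sort-and-slice selection by a one-pass bounded insertion keeping only the current top 5 (insert before the first strictly-smaller score, truncate to 5), and scores each entry by summing per-query-word hits (2 for key, 1 for value) over the deduplicated query words instead of building per-entry word sets and intersecting them.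
import Mathlib
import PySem

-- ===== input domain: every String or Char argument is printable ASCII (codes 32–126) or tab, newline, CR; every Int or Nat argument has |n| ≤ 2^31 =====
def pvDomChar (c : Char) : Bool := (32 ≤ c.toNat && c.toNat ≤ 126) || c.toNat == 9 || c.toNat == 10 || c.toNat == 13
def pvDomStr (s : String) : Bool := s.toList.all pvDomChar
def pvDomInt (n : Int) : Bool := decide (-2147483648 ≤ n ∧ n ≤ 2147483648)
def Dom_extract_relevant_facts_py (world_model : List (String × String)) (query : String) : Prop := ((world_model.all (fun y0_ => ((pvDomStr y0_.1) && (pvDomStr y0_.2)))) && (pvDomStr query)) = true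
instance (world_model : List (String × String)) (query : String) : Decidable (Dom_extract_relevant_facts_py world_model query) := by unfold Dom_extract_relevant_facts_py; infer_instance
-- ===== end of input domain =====

-- B replaces the full stable sort + [:5] slice by a one-pass bounded top-5 insertion and scores
-- by summing per-query-word hits instead of set intersections (objective: alternative, same result).
-- A's `except` branch is unreachable here: with string keys/values the body never raises.

-- ===== PORT A =====
def extract_relevant_facts_py (world_model : List (String × String)) (query : String) : List (String × String) :=
  let query_words : PySem.Set String := PySem.Set.ofList (PySem.Str.split₀ (PySem.Str.lower query))
  let relevant_facts : List (Int × String × String) :=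
    world_model.foldl (fun acc kv =>
      let key_words : PySem.Set String := PySem.Set.ofList (PySem.Str.split₀ (PySem.Str.lower kv.1))
      let value_words : PySem.Set String := PySem.Set.ofList (PySem.Str.split₀ (PySem.Str.lower kv.2))
      let key_overlap : Int := PySem.Set.len (PySem.Set.inter query_words key_words)
      let value_overlap : Int := PySem.Set.len (PySem.Set.inter query_words value_words)
      if key_overlap > 0 ∨ value_overlap > 0 then
        acc ++ [(key_overlap * 2 + value_overlap, kv.1, kv.2)]
      else acc) []
  let sorted_facts := PySem.List.sorted relevant_facts (fun x => x.1) true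
  (sorted_facts.take 5).map (fun x => (x.2.1, x.2.2))

-- ===== PORT B =====
-- `insertBy (fun a b => decide (b.1 < a.1))` is exactly Source B's while-loop insertion: skip the
-- prefix whose score is ≥ the new score, insert there; `take 5` is `del top[5:]`.
def extract_relevant_facts_py_alt (world_model : List (String × String)) (query : String) : List (String × String) :=
  let query_words : List String := PySem.List.dedup (PySem.Str.split₀ (PySem.Str.lower query))
  let top : List (Int × String × String) :=
    world_model.foldl (fun top kv =>
      let key_words := PySem.Str.split₀ (PySem.Str.lower kv.1)
      let value_words := PySem.Str.split₀ (PySem.Str.lower kv.2)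
      let score : Int := (query_words.map (fun w =>
        (if key_words.contains w then (2 : Int) else 0) +
        (if value_words.contains w then (1 : Int) else 0))).sum
      if score > 0 then
        (PySem.List.insertBy (fun a b => decide (b.1 < a.1)) (score, kv.1, kv.2) top).take 5
      else top) []
  top.map (fun x => (x.2.1, x.2.2))

-- ===== PRECONDITION & SPEC =====
def Spec_extract_relevant_facts_py (world_model : List (String × String)) (query : String) (out : List (String × String)) : Prop := out = extract_relevant_facts_py_alt world_model query
instance (world_model : List (String × String)) (query : String) (out : List (String × String)) : Decidable (Spec_extract_relevant_facts_py world_model query out) := by unfold Spec_extract_relevant_facts_py; infer_instance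

-- ===== CLAIM (what is proved, stated in full; the proofs are below) =====
def Claim_equal_extract_relevant_facts_py : Prop := ∀ (world_model : List (String × String)) (query : String), Dom_extract_relevant_facts_py world_model query → Spec_extract_relevant_facts_py world_model query (extract_relevant_facts_py world_model query)

-- ===== LEMMAS AND PROOFS =====

-- membership test on set(kw) agrees with the list membership test
theorem pv_contains_ofList (kw : List String) (w : String) :
    List.contains (PySem.Set.ofList kw) w = kw.contains w := by
  rw [Bool.eq_iff_iff]
  simp [PySem.Set.mem_ofList]

-- counting both filters at once equals the per-element 2/1 sum
theorem pv_sum_two_one (s : List String) (a b : String → Bool) :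
    ((s.filter a).length : Int) * 2 + ((s.filter b).length : Int)
      = (s.map (fun w => (if a w then (2 : Int) else 0) + (if b w then (1 : Int) else 0))).sum := by
  induction s with
  | nil => simp
  | cons x t ih =>
    simp only [List.filter_cons, List.map_cons, List.sum_cons]
    split_ifs <;> simp_all <;> omega

-- A's set-intersection score equals B's per-query-word sum
theorem pv_score_eq (q kw vw : List String) :
    PySem.Set.len (PySem.Set.inter (PySem.Set.ofList q) (PySem.Set.ofList kw)) * 2
      + PySem.Set.len (PySem.Set.inter (PySem.Set.ofList q) (PySem.Set.ofList vw))
      = ((PySem.List.dedup q).map (fun w =>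
          (if kw.contains w then (2 : Int) else 0) + (if vw.contains w then (1 : Int) else 0))).sum := by
  simp only [PySem.List.dedup_eq_ofList]
  generalize PySem.Set.ofList q = s
  simp only [PySem.Set.len, PySem.Set.inter, PySem.Set.contains_eq_listContains,
    pv_contains_ofList]
  exact pv_sum_two_one s _ _

-- inserting into a truncated buffer and truncating again is truncating the full insertion
theorem pv_insertBy_take {α : Type} (p : α → α → Bool) (x : α) :
    ∀ (l : List α) (k : Nat),
      (PySem.List.insertBy p x (l.take k)).take k = (PySem.List.insertBy p x l).take k := by
  intro l
  induction l with
  | nil => intro k; simp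
  | cons y ys ih =>
    intro k
    cases k with
    | zero => simp
    | succ n =>
      simp only [List.take_succ_cons, PySem.List.insertBy]
      by_cases h : p x y
      · simp only [h, if_true, List.take_succ_cons, List.cons.injEq, true_and]
        have h2 : (y :: List.take n ys) = List.take (n + 1) (y :: ys) := rfl
        rw [h2, List.take_take]
        simp
      · rw [if_neg h, if_neg h]
        simp only [List.take_succ_cons, List.cons.injEq, true_and]
        exact ih n

-- the bounded one-pass fold computes the truncation of the unbounded insertion fold
theorem pv_fold_insert_map {α β : Type} (p : β → β → Bool) (f : α → β) (k : Nat) :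
    ∀ (L : List α) (acc : List β),
      L.foldl (fun a x => (PySem.List.insertBy p (f x) a).take k) (acc.take k)
        = ((L.map f).foldl (fun a x => PySem.List.insertBy p x a) acc).take k := by
  intro L
  induction L with
  | nil => intro acc; rfl
  | cons x t ih =>
    intro acc
    simp only [List.foldl_cons, List.map_cons]
    rw [pv_insertBy_take, ih (PySem.List.insertBy p (f x) acc)]

-- the same, started from the empty buffer
theorem pv_fold_insert_map_nil {α β : Type} (p : β → β → Bool) (f : α → β) (k : Nat) (L : List α) :
    L.foldl (fun a x => (PySem.List.insertBy p (f x) a).take k) []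
      = ((L.map f).foldl (fun a x => PySem.List.insertBy p x a) []).take k := by
  have h := pv_fold_insert_map p f k L []
  simpa using h

-- a guarded fold is the fold over the filtered list (Prop-valued test variant)
theorem pv_foldl_ite_filter {α β : Type} (P : α → Prop) [DecidablePred P] (g : β → α → β) :
    ∀ (l : List α) (acc : β),
      l.foldl (fun a x => if P x then g a x else a) acc
        = (l.filter (fun x => decide (P x))).foldl g acc := by
  intro l
  induction l with
  | nil => intro acc; rfl
  | cons x t ih =>
    intro acc
    simp only [List.foldl_cons, List.filter_cons]
    by_cases h : P x <;> simp [h, ih]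

-- 2k+v > 0 iff k > 0 or v > 0, for counts
theorem pv_decide_pos (m n : Nat) :
    decide ((m : Int) * 2 + (n : Int) > 0) = decide ((m : Int) > 0 ∨ (n : Int) > 0) := by
  simp only [decide_eq_decide]
  omega

-- ===== VERDICT (by name: the statement is the Claim_ definition above) =====
theorem extract_relevant_facts_py_spec : Claim_equal_extract_relevant_facts_py := by
  intro world_model query _
  unfold Spec_extract_relevant_facts_py extract_relevant_facts_py extract_relevant_facts_py_alt
  simp only [pv_foldl_ite_filter, ← pv_score_eq, PySem.List.foldl_append_singleton_eq_map,
    List.nil_append, PySem.Set.len, pv_decide_pos, pv_fold_insert_map_nil,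
    PySem.List.sorted_rev_eq_foldl_insertBy]
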